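-- pv_equiv track=rewrite | github.com/develeep/Algorithm_Learn | swea/0214/carrot/main.py | pack_box
-- ===== SOURCE A (Python) =====
-- def pack_box(carrot_arr, n):
--     max_box = n // 2
--     result = 1000
--     for i in range(1, max_box+1):
--         for j in range(i+1,i + max_box + 1):
--             a = carrot_arr[:i]
--             b = carrot_arr[i:j]
--             c = carrot_arr[j:]
--             if not(a and b and c):
--                 continue
--             if len(a) > max_box or len(b) > max_box or len(c) > max_box:
--                 continue
--             if a[-1] == b[0] or b[-1] == c[0]:
--                 continue
--             len_box = [len(a), len(b), len(c)]
--             result = min(result, max(len_box) - min(len_box))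
--     return result if result < 1000 else -1
-- ===== SOURCE B (Python) =====
-- def pack_box(carrot_arr, n):
--     max_box = n // 2
--     L = len(carrot_arr)
--     # positions where the array value changes: the only places a cut may go
--     cuts = [k for k in range(1, L) if carrot_arr[k - 1] != carrot_arr[k]]
--     best = 1000
--     for idx, i in enumerate(cuts):
--         if i > max_box:
--             break
--         for j in cuts[idx + 1:]:
--             if j - i > max_box:
--                 break
--             if L - j <= max_box:
--                 lens = (i, j - i, L - j)
--                 best = min(best, max(lens) - min(lens))
--     return best if best < 1000 else -1
-- ===== Notes on version B (the rewrite author's own statement) =====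
-- stated objective: alternative
-- what changed: Instead of materialising the three slices for every (i,j) pair in the full rectangle, B precomputes the list of valid cut positions (indices where adjacent carrots differ) once and scans only ordered pairs of cuts with arithmetic lengths, breaking early via the sortedness of the cut list.
import Mathlib
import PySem

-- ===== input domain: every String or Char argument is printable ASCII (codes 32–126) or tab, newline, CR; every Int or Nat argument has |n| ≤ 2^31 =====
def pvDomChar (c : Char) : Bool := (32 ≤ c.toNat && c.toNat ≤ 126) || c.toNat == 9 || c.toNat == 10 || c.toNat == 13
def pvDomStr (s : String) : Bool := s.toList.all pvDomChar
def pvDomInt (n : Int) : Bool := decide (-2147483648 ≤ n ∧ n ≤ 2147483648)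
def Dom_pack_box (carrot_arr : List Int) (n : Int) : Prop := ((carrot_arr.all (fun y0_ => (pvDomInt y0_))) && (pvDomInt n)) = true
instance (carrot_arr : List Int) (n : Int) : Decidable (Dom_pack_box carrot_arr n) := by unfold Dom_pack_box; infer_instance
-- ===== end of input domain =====

-- B precomputes the valid cut positions once and scans only ordered pairs of cuts with
-- arithmetic lengths (no slicing), breaking early; objective: alternative algorithm.

-- ===== PORT A =====
def pack_box (carrot_arr : List Int) (n : Int) : Int :=
  let max_box := PySem.Int.floordiv n 2
  let result : Int := 1000
  let result := (PySem.List.pyRange 1 (max_box + 1) 1).foldl (fun result i =>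
    (PySem.List.pyRange (i + 1) (i + max_box + 1) 1).foldl (fun result j =>
      let a := PySem.List.slice carrot_arr none (some i)
      let b := PySem.List.slice carrot_arr (some i) (some j)
      let c := PySem.List.slice carrot_arr (some j) none
      if ¬(a ≠ [] ∧ b ≠ [] ∧ c ≠ []) then result
      else if ((a.length : Int) > max_box ∨ (b.length : Int) > max_box ∨ (c.length : Int) > max_box) then result
      -- a[-1], b[0], b[-1], c[0]: the lists are nonempty here, so the pyGetD default is never used
      else if (PySem.List.pyGetD a (-1) 0 = PySem.List.pyGetD b 0 0 ∨
               PySem.List.pyGetD b (-1) 0 = PySem.List.pyGetD c 0 0) then result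
      else
        let len_box : List Int := [(a.length : Int), (b.length : Int), (c.length : Int)]
        min result (((PySem.List.max? len_box (fun y => y)).getD 0) -
                    ((PySem.List.min? len_box (fun y => y)).getD 0))
      ) result) result
  if result < 1000 then result else -1

-- ===== PORT B =====
-- inner loop over the cuts after i ('for j in cuts[idx+1:]', with its break)
def packBoxAltInner (L max_box i : Int) : List Int → Int → Int
  | [], best => best
  | j :: rest, best =>
    if max_box < j - i then best
    else
      packBoxAltInner L max_box i rest
        (if L - j ≤ max_box then
           min best (max i (max (j - i) (L - j)) - min i (min (j - i) (L - j)))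
         else best)

-- outer loop over the cuts ('for idx, i in enumerate(cuts)', with its break)
def packBoxAltOuter (L max_box : Int) : List Int → Int → Int
  | [], best => best
  | i :: rest, best =>
    if max_box < i then best
    else packBoxAltOuter L max_box rest (packBoxAltInner L max_box i rest best)

def pack_box_alt (carrot_arr : List Int) (n : Int) : Int :=
  let max_box := PySem.Int.floordiv n 2
  let L : Int := carrot_arr.length
  let cuts := (PySem.List.pyRange 1 L 1).filter
    (fun k => decide (PySem.List.pyGetD carrot_arr (k - 1) 0 ≠ PySem.List.pyGetD carrot_arr k 0))
  let best := packBoxAltOuter L max_box cuts 1000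
  if best < 1000 then best else -1

-- ===== PRECONDITION & SPEC =====
def Spec_pack_box (carrot_arr : List Int) (n : Int) (out : Int) : Prop := out = pack_box_alt carrot_arr n
instance (carrot_arr : List Int) (n : Int) (out : Int) : Decidable (Spec_pack_box carrot_arr n out) := by unfold Spec_pack_box; infer_instance

-- ===== CLAIM (what is proved, stated in full; the proofs are below) =====
def Claim_equal_pack_box : Prop := ∀ (carrot_arr : List Int) (n : Int), Dom_pack_box carrot_arr n → Spec_pack_box carrot_arr n (pack_box carrot_arr n)

-- ===== LEMMAS AND PROOFS =====

-- the common abstract fold: both programs update `r := min r (spread i j)` exactly on the pairs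
-- (i,j) satisfying `condP` (valid three-part split, each part at most max_box, cuts at value changes)
def condP (arr : List Int) (mb : Int) (p : Int × Int) : Bool :=
  decide (1 ≤ p.1 ∧ p.1 < p.2 ∧ p.2 < (arr.length : Int) ∧ p.1 ≤ mb ∧ p.2 - p.1 ≤ mb ∧
    (arr.length : Int) - p.2 ≤ mb ∧
    PySem.List.pyGetD arr (p.1 - 1) 0 ≠ PySem.List.pyGetD arr p.1 0 ∧
    PySem.List.pyGetD arr (p.2 - 1) 0 ≠ PySem.List.pyGetD arr p.2 0)

def spreadP (L : Int) (p : Int × Int) : Int :=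
  max p.1 (max (p.2 - p.1) (L - p.2)) - min p.1 (min (p.2 - p.1) (L - p.2))

def gP (arr : List Int) (mb : Int) (r : Int) (p : Int × Int) : Int :=
  if condP arr mb p then min r (spreadP (arr.length : Int) p) else r

def pairsA (mb : Int) : List (Int × Int) :=
  (PySem.List.pyRange 1 (mb + 1) 1).flatMap
    (fun i => (PySem.List.pyRange (i + 1) (i + mb + 1) 1).map (Prod.mk i))

def pairsOf : List Int → List (Int × Int)
  | [] => []
  | i :: rest => rest.map (Prod.mk i) ++ pairsOf rest

def cutsOf (arr : List Int) : List Int :=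
  (PySem.List.pyRange 1 (arr.length : Int) 1).filter
    (fun k => decide (PySem.List.pyGetD arr (k - 1) 0 ≠ PySem.List.pyGetD arr k 0))

lemma foldl_g_no (arr : List Int) (mb : Int) (l : List (Int × Int))
    (h : ∀ p ∈ l, condP arr mb p = false) : ∀ r, l.foldl (gP arr mb) r = r := by
  induction l with
  | nil => intro r; rfl
  | cons p t ih =>
    intro r
    have hp := h p (by simp)
    simp only [List.foldl_cons, gP, hp, Bool.false_eq_true, if_false]
    exact ih (fun q hq => h q (by simp [hq])) r

lemma foldl_g_filter (arr : List Int) (mb : Int) (l : List (Int × Int)) :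
    ∀ r, l.foldl (gP arr mb) r = (l.filter (condP arr mb)).foldl (gP arr mb) r := by
  induction l with
  | nil => intro r; rfl
  | cons p t ih =>
    intro r
    by_cases hp : condP arr mb p
    · simp only [List.foldl_cons, List.filter_cons, hp, if_true]
      exact ih _
    · have hp' : condP arr mb p = false := by
        cases h : condP arr mb p
        · rfl
        · exact absurd h hp
      simp only [List.foldl_cons, List.filter_cons, hp', Bool.false_eq_true, if_false, gP]
      exact ih r

lemma g_rightComm (arr : List Int) (mb : Int) :
    ∀ r p q, gP arr mb (gP arr mb r p) q = gP arr mb (gP arr mb r q) p := by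
  intro r p q
  unfold gP
  split_ifs <;> omega

-- indexing helpers: the boundary elements of the three slices, expressed over the whole array
lemma pyGetD_take_neg_one (l : List Int) (k : Nat) (h0 : 0 < k) (hk : k ≤ l.length) :
    PySem.List.pyGetD (l.take k) (-1) 0 = PySem.List.pyGetD l ((k : Int) - 1) 0 := by
  have hlen : (l.take k).length = k := by simp [List.length_take]; omega
  have hne : l.take k ≠ [] := by
    apply List.ne_nil_of_length_pos; rw [hlen]; exact h0
  rw [PySem.List.pyGetD_neg_one _ _ hne]
  have hcast : (k : Int) - 1 = ((k - 1 : Nat) : Int) := by omega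
  rw [hcast, PySem.List.pyGetD_natCast]
  rw [List.getLast_eq_getElem]
  rw [List.getD_eq_getElem _ _ (by omega)]
  simp only [hlen, List.getElem_take]

lemma pyGetD_zero_drop (l : List Int) (a : Nat) :
    PySem.List.pyGetD (l.drop a) 0 0 = PySem.List.pyGetD l (a : Int) 0 := by
  rw [PySem.List.pyGetD_zero, PySem.List.pyGetD_natCast]
  simp [List.getD_eq_getElem?_getD, List.getElem?_drop]

lemma pyGetD_zero_take (l : List Int) (m : Nat) (h0 : 0 < m) :
    PySem.List.pyGetD (l.take m) 0 0 = PySem.List.pyGetD l 0 0 := by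
  rw [PySem.List.pyGetD_zero, PySem.List.pyGetD_zero]
  simp [List.getD_eq_getElem?_getD, h0]

lemma pyGetD_take_drop_neg_one (l : List Int) (a m : Nat) (h0 : 0 < m) (ham : a + m ≤ l.length) :
    PySem.List.pyGetD ((l.drop a).take m) (-1) 0 = PySem.List.pyGetD l ((a : Int) + (m : Int) - 1) 0 := by
  have hlen : ((l.drop a).take m).length = m := by simp [List.length_take, List.length_drop]; omega
  have hne : (l.drop a).take m ≠ [] := by
    apply List.ne_nil_of_length_pos; rw [hlen]; exact h0
  rw [PySem.List.pyGetD_neg_one _ _ hne]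
  have hcast : (a : Int) + (m : Int) - 1 = ((a + m - 1 : Nat) : Int) := by omega
  rw [hcast, PySem.List.pyGetD_natCast]
  rw [List.getLast_eq_getElem]
  rw [List.getD_eq_getElem _ _ (by omega)]
  simp only [hlen, List.getElem_take, List.getElem_drop]
  congr 1
  omega

-- the body of A's inner loop equals one gP step
lemma bodyA_eq (arr : List Int) (mb i j r : Int)
    (hi1 : 1 ≤ i) (himb : i ≤ mb) (hij : i + 1 ≤ j) (hjmb : j ≤ i + mb) :
    (let a := PySem.List.slice arr none (some i)
     let b := PySem.List.slice arr (some i) (some j)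
     let c := PySem.List.slice arr (some j) none
     if ¬(a ≠ [] ∧ b ≠ [] ∧ c ≠ []) then r
     else if ((a.length : Int) > mb ∨ (b.length : Int) > mb ∨ (c.length : Int) > mb) then r
     else if (PySem.List.pyGetD a (-1) 0 = PySem.List.pyGetD b 0 0 ∨
              PySem.List.pyGetD b (-1) 0 = PySem.List.pyGetD c 0 0) then r
     else
       min r (((PySem.List.max? [(a.length : Int), (b.length : Int), (c.length : Int)] (fun y => y)).getD 0) -
              ((PySem.List.min? [(a.length : Int), (b.length : Int), (c.length : Int)] (fun y => y)).getD 0)))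
    = gP arr mb r (i, j) := by
  have h0i : (0 : Int) ≤ i := by omega
  have h0j : (0 : Int) ≤ j := by omega
  dsimp only
  rw [PySem.List.slice_to arr h0i, PySem.List.slice_from arr h0j,
    PySem.List.slice_toNat arr h0i h0j]
  by_cases hjL : j < (arr.length : Int)
  · have hIn : i.toNat < arr.length := by omega
    have hJn : j.toNat < arr.length := by omega
    have ha_len : (arr.take i.toNat).length = i.toNat := by simp [List.length_take]; omega
    have hb_len : ((arr.drop i.toNat).take (j.toNat - i.toNat)).length = j.toNat - i.toNat := by
      simp [List.length_take, List.length_drop]; omega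
    have hc_len : (arr.drop j.toNat).length = arr.length - j.toNat := by simp
    have ha_ne : arr.take i.toNat ≠ [] := by
      apply List.ne_nil_of_length_pos; rw [ha_len]; omega
    have hb_ne : (arr.drop i.toNat).take (j.toNat - i.toNat) ≠ [] := by
      apply List.ne_nil_of_length_pos; rw [hb_len]; omega
    have hc_ne : arr.drop j.toNat ≠ [] := by
      apply List.ne_nil_of_length_pos; rw [hc_len]; omega
    rw [if_neg (not_not.mpr ⟨ha_ne, hb_ne, hc_ne⟩)]
    have hAi : ((arr.take i.toNat).length : Int) = i := by rw [ha_len]; omega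
    have hBi : (((arr.drop i.toNat).take (j.toNat - i.toNat)).length : Int) = j - i := by
      rw [hb_len]; omega
    have hCi : ((arr.drop j.toNat).length : Int) = (arr.length : Int) - j := by rw [hc_len]; omega
    simp only [hAi, hBi, hCi]
    by_cases hLj : (arr.length : Int) - j ≤ mb
    · rw [if_neg (by omega)]
      have e1 : PySem.List.pyGetD (arr.take i.toNat) (-1) 0 = PySem.List.pyGetD arr (i - 1) 0 := by
        rw [pyGetD_take_neg_one arr i.toNat (by omega) (le_of_lt hIn)]; congr 1; omega
      have e2 : PySem.List.pyGetD ((arr.drop i.toNat).take (j.toNat - i.toNat)) 0 0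
          = PySem.List.pyGetD arr i 0 := by
        rw [pyGetD_zero_take _ _ (by omega), pyGetD_zero_drop]; congr 1; omega
      have e3 : PySem.List.pyGetD ((arr.drop i.toNat).take (j.toNat - i.toNat)) (-1) 0
          = PySem.List.pyGetD arr (j - 1) 0 := by
        rw [pyGetD_take_drop_neg_one arr i.toNat (j.toNat - i.toNat) (by omega) (by omega)]
        congr 1; omega
      have e4 : PySem.List.pyGetD (arr.drop j.toNat) 0 0 = PySem.List.pyGetD arr j 0 := by
        rw [pyGetD_zero_drop]; congr 1; omega
      rw [e1, e2, e3, e4]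
      by_cases hcut : PySem.List.pyGetD arr (i - 1) 0 = PySem.List.pyGetD arr i 0 ∨
          PySem.List.pyGetD arr (j - 1) 0 = PySem.List.pyGetD arr j 0
      · rw [if_pos hcut]
        have hcond : condP arr mb (i, j) = false := by
          unfold condP; apply decide_eq_false
          rintro ⟨-, -, -, -, -, -, h7, h8⟩
          rcases hcut with h | h
          · exact h7 h
          · exact h8 h
        simp [gP, hcond]
      · rw [if_neg hcut]
        rcases not_or.mp hcut with ⟨hc1, hc2⟩
        have hcond : condP arr mb (i, j) = true := by
          unfold condP; apply decide_eq_true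
          exact ⟨by omega, by omega, hjL, himb, by omega, hLj, hc1, hc2⟩
        rw [PySem.List.max?_id_cons, PySem.List.min?_id_cons]
        simp only [List.foldl_cons, List.foldl_nil, Option.getD_some]
        simp only [gP, hcond, if_true, spreadP]
        congr 1
        rw [max_assoc, min_assoc]
    · rw [if_pos (by omega)]
      have hcond : condP arr mb (i, j) = false := by
        unfold condP; apply decide_eq_false
        rintro ⟨-, -, -, -, -, h6, -⟩
        omega
      simp [gP, hcond]
  · have hc : arr.drop j.toNat = [] := by rw [List.drop_eq_nil_iff]; omega
    rw [hc]
    rw [if_pos (by simp)]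
    have hcond : condP arr mb (i, j) = false := by
      unfold condP; apply decide_eq_false
      rintro ⟨-, -, h3, -⟩
      omega
    simp [gP, hcond]

lemma A_fold (arr : List Int) (mb : Int) :
    (PySem.List.pyRange 1 (mb + 1) 1).foldl (fun result i =>
      (PySem.List.pyRange (i + 1) (i + mb + 1) 1).foldl (fun result j =>
        let a := PySem.List.slice arr none (some i)
        let b := PySem.List.slice arr (some i) (some j)
        let c := PySem.List.slice arr (some j) none
        if ¬(a ≠ [] ∧ b ≠ [] ∧ c ≠ []) then result
        else if ((a.length : Int) > mb ∨ (b.length : Int) > mb ∨ (c.length : Int) > mb) then result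
        else if (PySem.List.pyGetD a (-1) 0 = PySem.List.pyGetD b 0 0 ∨
                 PySem.List.pyGetD b (-1) 0 = PySem.List.pyGetD c 0 0) then result
        else
          let len_box : List Int := [(a.length : Int), (b.length : Int), (c.length : Int)]
          min result (((PySem.List.max? len_box (fun y => y)).getD 0) -
                      ((PySem.List.min? len_box (fun y => y)).getD 0))
        ) result) 1000
    = (pairsA mb).foldl (gP arr mb) 1000 := by
  unfold pairsA
  rw [List.foldl_flatMap]
  apply PySem.List.foldl_congr_mem
  intro acc i hi
  rw [List.foldl_map]
  apply PySem.List.foldl_congr_mem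
  intro acc2 j hj
  rcases PySem.List.mem_pyRange_one.mp hi with ⟨hi1, hi2⟩
  rcases PySem.List.mem_pyRange_one.mp hj with ⟨hj1, hj2⟩
  exact bodyA_eq arr mb i j acc2 hi1 (by omega) hj1 (by omega)

lemma A_eq (arr : List Int) (n : Int) :
    pack_box arr n =
      (if (pairsA (PySem.Int.floordiv n 2)).foldl (gP arr (PySem.Int.floordiv n 2)) 1000 < 1000
       then (pairsA (PySem.Int.floordiv n 2)).foldl (gP arr (PySem.Int.floordiv n 2)) 1000 else -1) := by
  unfold pack_box
  dsimp only
  rw [A_fold]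

lemma mem_cutsOf (arr : List Int) (k : Int) :
    k ∈ cutsOf arr ↔ 1 ≤ k ∧ k < (arr.length : Int) ∧
      PySem.List.pyGetD arr (k - 1) 0 ≠ PySem.List.pyGetD arr k 0 := by
  simp [cutsOf, List.mem_filter, PySem.List.mem_pyRange_one, and_assoc]

lemma pairwise_cutsOf (arr : List Int) : (cutsOf arr).Pairwise (· < ·) := by
  exact List.Pairwise.filter _ (PySem.List.pairwise_lt_pyRange_one _ _)

lemma mem_pairsOf (cs : List Int) (hs : cs.Pairwise (· < ·)) (p : Int × Int) :
    p ∈ pairsOf cs ↔ p.1 ∈ cs ∧ p.2 ∈ cs ∧ p.1 < p.2 := by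
  induction cs with
  | nil => simp [pairsOf]
  | cons x rest ih =>
    have hlt : ∀ y ∈ rest, x < y := (fun y hy => List.rel_of_pairwise_cons hs hy)
    have ih' := ih (List.Pairwise.sublist (List.sublist_cons_self x rest) hs)
    constructor
    · intro hp
      rcases List.mem_append.mp hp with hm | hm
      · rcases List.mem_map.mp hm with ⟨j, hj, hpe⟩
        subst hpe
        exact ⟨by simp, by simp [hj], hlt j hj⟩
      · rcases ih'.mp hm with ⟨h1, h2, h3⟩
        exact ⟨by simp [h1], by simp [h2], h3⟩
    · rintro ⟨h1, h2, h3⟩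
      rcases List.mem_cons.mp h1 with he | h1r
      · have h2r : p.2 ∈ rest := by
          rcases List.mem_cons.mp h2 with he2 | h2r
          · omega
          · exact h2r
        apply List.mem_append.mpr; left
        exact List.mem_map.mpr ⟨p.2, h2r, by rw [← he]⟩
      · have h2r : p.2 ∈ rest := by
          rcases List.mem_cons.mp h2 with he2 | h2r
          · exfalso; have := hlt p.1 h1r; omega
          · exact h2r
        exact List.mem_append.mpr (Or.inr (ih'.mpr ⟨h1r, h2r, h3⟩))

lemma nodup_pairsOf (cs : List Int) (hs : cs.Pairwise (· < ·)) : (pairsOf cs).Nodup := by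
  induction cs with
  | nil => simp [pairsOf]
  | cons x rest ih =>
    have hlt : ∀ y ∈ rest, x < y := (fun y hy => List.rel_of_pairwise_cons hs hy)
    have hst : rest.Pairwise (· < ·) := List.Pairwise.sublist (List.sublist_cons_self x rest) hs
    refine List.Nodup.append ?_ (ih hst) ?_
    · exact List.Nodup.map (fun a b hab => (Prod.mk.injEq _ _ _ _).mp hab |>.2) hst.nodup
    · intro p hp hq
      rcases List.mem_map.mp hp with ⟨j, _, hpe⟩
      have h1 : p.1 ∈ rest := ((mem_pairsOf rest hst p).mp hq).1
      have := hlt p.1 h1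
      subst hpe
      simp at this

lemma inner_eq (arr : List Int) (mb i : Int)
    (hi1 : 1 ≤ i) (himb : i ≤ mb)
    (hic : PySem.List.pyGetD arr (i - 1) 0 ≠ PySem.List.pyGetD arr i 0) :
    ∀ (rest : List Int) (best : Int), rest.Pairwise (· < ·) →
      (∀ j ∈ rest, i < j ∧ j ∈ cutsOf arr) →
      packBoxAltInner (arr.length : Int) mb i rest best
        = (rest.map (Prod.mk i)).foldl (gP arr mb) best := by
  intro rest
  induction rest with
  | nil => intro best _ _; rfl
  | cons j t ih =>
    intro best hs hmem
    have hjc := hmem j (by simp)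
    rcases (mem_cutsOf arr j).mp hjc.2 with ⟨hj1, hjL, hjcut⟩
    have hij := hjc.1
    have hst : t.Pairwise (· < ·) := hs.sublist (List.sublist_cons_self j t)
    have hjt : ∀ y ∈ t, j < y := fun y hy => List.rel_of_pairwise_cons hs hy
    simp only [packBoxAltInner]
    by_cases hbr : mb < j - i
    · rw [if_pos hbr]
      symm
      apply foldl_g_no
      intro p hp
      rcases List.mem_map.mp hp with ⟨j', hj', hpe⟩
      subst hpe
      have hjj' : j ≤ j' := by
        rcases List.mem_cons.mp hj' with h | h
        · omega
        · exact le_of_lt (hjt _ h)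
      unfold condP; apply decide_eq_false
      rintro ⟨-, -, -, -, h5, -⟩
      simp only at h5
      omega
    · rw [if_neg hbr]
      rw [List.map_cons, List.foldl_cons]
      have hstep : (if (arr.length : Int) - j ≤ mb then
            min best (max i (max (j - i) ((arr.length : Int) - j)) -
                      min i (min (j - i) ((arr.length : Int) - j)))
          else best) = gP arr mb best (i, j) := by
        unfold gP condP spreadP
        by_cases hLj : (arr.length : Int) - j ≤ mb
        · rw [if_pos hLj, if_pos (decide_eq_true
            ⟨hi1, by omega, hjL, himb, by omega, hLj, hic, hjcut⟩)]
        · rw [if_neg hLj, if_neg]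
          simp only [decide_eq_true_eq]
          rintro ⟨-, -, -, -, -, h6, -⟩
          omega
      rw [hstep]
      exact ih _ hst (fun y hy => hmem y (by simp [hy]))

lemma outer_eq (arr : List Int) (mb : Int) :
    ∀ (cs : List Int) (best : Int), cs.Pairwise (· < ·) →
      (∀ k ∈ cs, k ∈ cutsOf arr) →
      packBoxAltOuter (arr.length : Int) mb cs best = (pairsOf cs).foldl (gP arr mb) best := by
  intro cs
  induction cs with
  | nil => intro best _ _; rfl
  | cons i t ih =>
    intro best hs hmem
    have hic := hmem i (by simp)
    rcases (mem_cutsOf arr i).mp hic with ⟨hi1, hiL, hcut⟩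
    have hst : t.Pairwise (· < ·) := hs.sublist (List.sublist_cons_self i t)
    have hit : ∀ y ∈ t, i < y := fun y hy => List.rel_of_pairwise_cons hs hy
    simp only [packBoxAltOuter, pairsOf]
    by_cases hbr : mb < i
    · rw [if_pos hbr]
      symm
      apply foldl_g_no
      intro p hp
      have hp1 : i ≤ p.1 := by
        rcases List.mem_append.mp hp with h | h
        · rcases List.mem_map.mp h with ⟨j', _, hpe⟩
          subst hpe; simp
        · exact le_of_lt (hit _ ((mem_pairsOf t hst p).mp h).1)
      unfold condP; apply decide_eq_false
      rintro ⟨-, -, -, h4, -⟩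
      omega
    · rw [if_neg hbr]
      rw [List.foldl_append]
      rw [inner_eq arr mb i hi1 (by omega) hcut t best hst
        (fun j hj => ⟨hit j hj, hmem j (by simp [hj])⟩)]
      exact ih _ hst (fun k hk => hmem k (by simp [hk]))

lemma B_eq (arr : List Int) (n : Int) :
    pack_box_alt arr n =
      (if (pairsOf (cutsOf arr)).foldl (gP arr (PySem.Int.floordiv n 2)) 1000 < 1000
       then (pairsOf (cutsOf arr)).foldl (gP arr (PySem.Int.floordiv n 2)) 1000 else -1) := by
  unfold pack_box_alt
  dsimp only
  have hcuts : (PySem.List.pyRange 1 ((arr.length : Int)) 1).filter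
      (fun k => decide (PySem.List.pyGetD arr (k - 1) 0 ≠ PySem.List.pyGetD arr k 0)) = cutsOf arr := rfl
  rw [hcuts]
  rw [outer_eq arr (PySem.Int.floordiv n 2) (cutsOf arr) 1000 (pairwise_cutsOf arr)
    (fun k hk => hk)]

lemma nodup_flatMap_mk (f : Int → List Int) (l : List Int) (hl : l.Nodup)
    (hf : ∀ i, (f i).Nodup) : (l.flatMap (fun i => (f i).map (Prod.mk i))).Nodup := by
  induction l with
  | nil => simp
  | cons i t ih =>
    rw [List.flatMap_cons]
    refine List.Nodup.append ?_ (ih (List.Nodup.of_cons hl)) ?_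
    · exact List.Nodup.map (fun a b hab => (Prod.mk.injEq _ _ _ _).mp hab |>.2) (hf i)
    · intro p hp hq
      rcases List.mem_map.mp hp with ⟨j, _, hpe⟩
      rcases List.mem_flatMap.mp hq with ⟨i', hi', hm'⟩
      rcases List.mem_map.mp hm' with ⟨j', hj', hpe'⟩
      have : i' = i := by rw [← hpe] at hpe'; exact ((Prod.mk.injEq _ _ _ _).mp hpe').1
      subst this
      exact (List.nodup_cons.mp hl).1 hi'

lemma nodup_pairsA (mb : Int) : (pairsA mb).Nodup := by
  unfold pairsA
  exact nodup_flatMap_mk _ _ (PySem.List.nodup_pyRange_one _ _)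
    (fun i => PySem.List.nodup_pyRange_one _ _)

lemma mem_pairsA (mb : Int) (p : Int × Int) :
    p ∈ pairsA mb ↔ 1 ≤ p.1 ∧ p.1 < mb + 1 ∧ p.1 + 1 ≤ p.2 ∧ p.2 < p.1 + mb + 1 := by
  unfold pairsA
  constructor
  · intro hp
    rcases List.mem_flatMap.mp hp with ⟨i, hi, hm⟩
    rcases List.mem_map.mp hm with ⟨j, hj, hpe⟩
    subst hpe
    rcases PySem.List.mem_pyRange_one.mp hi with ⟨hi1, hi2⟩
    rcases PySem.List.mem_pyRange_one.mp hj with ⟨hj1, hj2⟩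
    exact ⟨hi1, hi2, hj1, hj2⟩
  · rintro ⟨h1, h2, h3, h4⟩
    exact List.mem_flatMap.mpr ⟨p.1, PySem.List.mem_pyRange_one.mpr ⟨h1, h2⟩,
      List.mem_map.mpr ⟨p.2, PySem.List.mem_pyRange_one.mpr ⟨h3, h4⟩, rfl⟩⟩

lemma folds_agree (arr : List Int) (mb : Int) :
    (pairsA mb).foldl (gP arr mb) 1000 = (pairsOf (cutsOf arr)).foldl (gP arr mb) 1000 := by
  rw [foldl_g_filter arr mb (pairsA mb), foldl_g_filter arr mb (pairsOf (cutsOf arr))]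
  have hnA : ((pairsA mb).filter (condP arr mb)).Nodup := (nodup_pairsA mb).filter _
  have hnB : ((pairsOf (cutsOf arr)).filter (condP arr mb)).Nodup :=
    (nodup_pairsOf _ (pairwise_cutsOf arr)).filter _
  have hperm : ((pairsA mb).filter (condP arr mb)).Perm
      ((pairsOf (cutsOf arr)).filter (condP arr mb)) := by
    rw [List.perm_ext_iff_of_nodup hnA hnB]
    intro p
    simp only [List.mem_filter]
    constructor
    · rintro ⟨-, hc⟩
      refine ⟨?_, hc⟩
      have hc' := of_decide_eq_true (by exact hc)
      obtain ⟨h1, h2, h3, h4, h5, h6, h7, h8⟩ := hc'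
      refine (mem_pairsOf _ (pairwise_cutsOf arr) p).mpr ?_
      exact ⟨(mem_cutsOf arr p.1).mpr ⟨h1, by omega, h7⟩,
        (mem_cutsOf arr p.2).mpr ⟨by omega, h3, h8⟩, h2⟩
    · rintro ⟨-, hc⟩
      refine ⟨?_, hc⟩
      have hc' := of_decide_eq_true (by exact hc)
      obtain ⟨h1, h2, h3, h4, h5, h6, h7, h8⟩ := hc'
      exact (mem_pairsA mb p).mpr ⟨h1, by omega, by omega, by omega⟩
  haveI : RightCommutative (gP arr mb) := ⟨fun r p q => g_rightComm arr mb r p q⟩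
  exact hperm.foldl_eq 1000

-- ===== VERDICT (by name: the statement is the Claim_ definition above) =====
theorem pack_box_spec : Claim_equal_pack_box := by
  intro arr n _hdom
  unfold Spec_pack_box
  rw [A_eq, B_eq, folds_agree]
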